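-- pv_equiv track=rewrite | github.com/lmProgramming/Uni-Scripting-Languages | 7/functional.py | analyze_word
-- ===== SOURCE A (Python) =====
-- from typing import List, Tuple, Dict, Any
--
-- def analyze_word(word: str, chars: List[str], dictionary: Dict[str, List[str]]):
--     if len(chars) == 0:
--         return dictionary
--     char, tail = chars[0], chars[1:]
--     if char.isalpha():
--         if char in dictionary:
--             dictionary[char].append(word)
--         else:
--             dictionary[char] = [word]
--     return analyze_word(word, tail, dictionary)
-- ===== SOURCE B (Python) =====
-- def analyze_word(word, chars, dictionary):
--     # Counting pass first, then build the result in
--     # two staged passes: existing keys extended, then new keys appended in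
--     # first-occurrence order. (A mutates `dictionary` in place; B builds a new
--     # dict -- the return values are identical.)
--     counts = {}
--     for c in chars:
--         if c.isalpha():
--             counts[c] = counts.get(c, 0) + 1
--     result = {k: v + [word] * counts.get(k, 0) for k, v in dictionary.items()}
--     for c, n in counts.items():
--         if c not in dictionary:
--             result[c] = [word] * n
--     return result
-- ===== Notes on version B (the rewrite author's own statement) =====
-- stated objective: alternative
-- what changed: Replaces A's tail recursion that re-slices chars[1:] and updates the dict once per character with a counting pass (Counter-style dict) followed by two staged passes that build the result: existing keys extended by word*count, new keys appended once in first-occurrence order.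
import Mathlib
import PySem

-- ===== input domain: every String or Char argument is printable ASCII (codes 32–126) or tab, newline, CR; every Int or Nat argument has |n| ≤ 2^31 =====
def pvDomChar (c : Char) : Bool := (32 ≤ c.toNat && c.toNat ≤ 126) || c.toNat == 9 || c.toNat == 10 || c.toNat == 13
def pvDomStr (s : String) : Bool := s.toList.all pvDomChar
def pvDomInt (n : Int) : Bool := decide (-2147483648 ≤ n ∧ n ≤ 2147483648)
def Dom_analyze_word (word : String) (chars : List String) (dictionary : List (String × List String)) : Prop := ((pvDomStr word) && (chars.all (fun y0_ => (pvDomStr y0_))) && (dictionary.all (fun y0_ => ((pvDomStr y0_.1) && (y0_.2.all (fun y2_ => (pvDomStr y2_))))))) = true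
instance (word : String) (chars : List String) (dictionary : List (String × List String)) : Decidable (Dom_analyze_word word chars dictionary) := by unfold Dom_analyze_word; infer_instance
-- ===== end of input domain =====

-- B replaces A's per-character tail recursion (which re-slices chars[1:] each step and
-- touches the dict once per character) with a counting pass plus two staged passes that
-- build the result. A mutates `dictionary` in place in Python while B builds a new
-- dict; the equivalence proved is about the return value.
-- ===== PORT A =====
-- Python str.isalpha() on a whole string: nonempty and every character alphabetic
-- (exact on the ASCII domain via PySem.Chars.isalpha per character).
def pyStrIsalpha (s : String) : Bool := !s.toList.isEmpty && s.toList.all PySem.Chars.isalpha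

-- A's recursion: `char, tail = chars[0], chars[1:]`, branch on `char in dictionary`,
-- append / fresh singleton, recurse on the tail.
def pvARec (word : String) (chars : List String) (d : PySem.Dict String (List String)) :
    PySem.Dict String (List String) :=
  match chars with
  | [] => d
  | char :: tail =>
    let d' :=
      if pyStrIsalpha char then
        if d.contains char then d.modify char [] (fun l => l ++ [word])
        else d.insert char [word]
      else d
    pvARec word tail d'

def analyze_word (word : String) (chars : List String) (dictionary : List (String × List String)) : List (String × List String) :=
  (pvARec word chars (PySem.Dict.mk dictionary)).items

-- ===== PORT B =====
-- B's counting pass: `counts[c] = counts.get(c, 0) + 1` for alphabetic c.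
def pvCounts (chars : List String) : PySem.Dict String Int :=
  chars.foldl (fun d c => if pyStrIsalpha c then d.insert c (d.getD c 0 + 1) else d)
    PySem.Dict.empty

-- B's two staged passes: extend every existing entry by word*count, then append the
-- counted chars not already keys of `dictionary`, each with [word]*count.
def analyze_word_alt (word : String) (chars : List String) (dictionary : List (String × List String)) : List (String × List String) :=
  let counts := pvCounts chars
  dictionary.map (fun kv => (kv.1, kv.2 ++ List.replicate (counts.getD kv.1 0).toNat word))
    ++ (counts.items.filter (fun p => !((dictionary.map Prod.fst).contains p.1))).map
        (fun p => (p.1, List.replicate p.2.toNat word))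

-- ===== PRECONDITION & SPEC =====
-- Pre_ excludes association lists with duplicate keys: the Python argument is a dict,
-- whose keys are necessarily distinct, so no Python input is excluded.
def Pre_analyze_word (word : String) (chars : List String) (dictionary : List (String × List String)) : Prop :=
  (dictionary.map Prod.fst).Nodup
instance (word : String) (chars : List String) (dictionary : List (String × List String)) : Decidable (Pre_analyze_word word chars dictionary) := by unfold Pre_analyze_word; infer_instance

def pvWitness_analyze_word : String × List String × (List (String × List String)) :=
  ("hi", ["a", "B", "a", "1", ""], [("a", ["x"]), ("z", [])])

def Spec_analyze_word (word : String) (chars : List String) (dictionary : List (String × List String)) (out : List (String × List String)) : Prop := out = analyze_word_alt word chars dictionary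
instance (word : String) (chars : List String) (dictionary : List (String × List String)) (out : List (String × List String)) : Decidable (Spec_analyze_word word chars dictionary out) := by unfold Spec_analyze_word; infer_instance

-- ===== CLAIM (what is proved, stated in full; the proofs are below) =====
def Claim_equal_analyze_word : Prop := ∀ (word : String) (chars : List String) (dictionary : List (String × List String)), Dom_analyze_word word chars dictionary → Pre_analyze_word word chars dictionary → Spec_analyze_word word chars dictionary (analyze_word word chars dictionary)

-- ===== LEMMAS AND PROOFS =====

-- A's step is uniformly a modify: inserting [word] for an absent key IS
-- modify with default [] (getD gives [], and [] ++ [word] = [word]).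
theorem pvA_step_modify (word char : String) (d : PySem.Dict String (List String)) :
    (if pyStrIsalpha char then
       if d.contains char then d.modify char [] (fun l => l ++ [word])
       else d.insert char [word]
     else d)
    = if pyStrIsalpha char then d.modify char [] (fun l => l ++ [word]) else d := by
  by_cases hc : d.contains char = true
  · simp [hc]
  · simp only [Bool.not_eq_true] at hc
    simp [hc, PySem.Dict.modify, PySem.Dict.getD_of_not_contains d [] hc]

-- A's recursion is a fold of that modify over the alphabetic chars.
theorem pvARec_eq (word : String) (chars : List String)
    (d : PySem.Dict String (List String)) :
    pvARec word chars d
      = (chars.filter pyStrIsalpha).foldl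
          (fun d c => d.modify c [] (fun l => l ++ [word])) d := by
  induction chars generalizing d with
  | nil => rfl
  | cons c t ih =>
    show pvARec word t _ = _
    rw [ih, pvA_step_modify, List.filter_cons]
    by_cases ha : pyStrIsalpha c = true
    · simp [ha]
    · simp [ha]

-- B's counting pass is Counter(filter(isalpha, chars)).
theorem pvCounts_eq (chars : List String) :
    pvCounts chars = PySem.Dict.counter (chars.filter pyStrIsalpha) := by
  unfold pvCounts
  rw [← List.foldl_filter, PySem.Dict.foldl_insert_getD_add_one_eq_counter]

-- Values of A's fold: each key's list gains word once per occurrence in L.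
theorem pvA_getD (word : String) (L : List String)
    (d : PySem.Dict String (List String)) (k : String) :
    (L.foldl (fun d c => d.modify c [] (fun l => l ++ [word])) d).getD k []
      = d.getD k [] ++ List.replicate (L.count k) word := by
  have hmap : L.foldl (fun d c => d.modify c [] (fun l => l ++ [word])) d
      = (L.map (fun c => (c, word))).foldl
          (fun d p => d.modify p.1 [] (fun l => l ++ [p.2])) d := by
    rw [List.foldl_map]
  rw [hmap, PySem.Dict.getD_foldl_modify_append, List.filter_map, List.map_map]
  have hlen : ((L.filter (fun x => x == k)).map
      ((fun p => p.2) ∘ (fun c => (c, word)))) = List.replicate (L.count k) word := by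
    have : ((fun (p : String × String) => p.2) ∘ (fun c => (c, word)))
        = fun (_ : String) => word := rfl
    rw [this, List.map_const', List.count_eq_countP, List.countP_eq_length_filter]
  rw [← hlen]
  rfl

-- ===== VERDICT (by name: the statement is the Claim_ definition above) =====
theorem analyze_word_spec : Claim_equal_analyze_word := by
  intro word chars dictionary _ hnd
  unfold Pre_analyze_word at hnd
  unfold Spec_analyze_word analyze_word analyze_word_alt
  rw [pvARec_eq, pvCounts_eq]
  set L := chars.filter pyStrIsalpha with hL
  have hkeys_mk : (PySem.Dict.mk dictionary).keys = dictionary.map Prod.fst := rfl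
  have hitems_mk : (PySem.Dict.mk dictionary).items = dictionary := rfl
  set D := L.foldl (fun d c => d.modify c [] (fun l => l ++ [word]))
      (PySem.Dict.mk dictionary) with hD
  have hDkeys : D.keys = PySem.Set.update (dictionary.map Prod.fst) L := by
    rw [hD, PySem.Dict.keys_foldl_modify, hkeys_mk]
  have hDnodup : D.keys.Nodup := by
    rw [hDkeys]
    exact PySem.Set.nodup_update _ L hnd
  rw [PySem.Dict.items_eq_map_keys D hDnodup [], hDkeys,
    PySem.Set.update_eq_append_filter, List.map_append]
  congr 1
  · -- existing keys
    rw [List.map_map]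
    refine List.map_congr_left ?_
    intro kv hkv
    have hget : (PySem.Dict.mk dictionary).getD kv.1 [] = kv.2 := by
      apply PySem.Dict.getD_of_mem_items
      · rw [hitems_mk]; exact hkv
      · rw [hkeys_mk]; exact hnd
    simp only [Function.comp_apply, hD]
    rw [pvA_getD, hget, PySem.Dict.getD_counter]
    simp
  · -- new keys, in first-occurrence order
    rw [PySem.Dict.items_counter, List.filter_map, List.map_map]
    refine List.map_congr_left ?_
    intro k hk
    have hkmem := List.of_mem_filter hk
    simp only [Bool.not_eq_eq_eq_not, Bool.not_true,
      PySem.Set.contains_eq_listContains] at hkmem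
    have hnotin : (PySem.Dict.mk dictionary).contains k = false := by
      have hnm : ¬ k ∈ (PySem.Dict.mk dictionary).keys := by
        rw [hkeys_mk]
        intro hmem
        have hct : (List.map Prod.fst dictionary).contains k = true :=
          List.contains_iff_mem.mpr hmem
        rw [hkmem] at hct
        exact Bool.false_ne_true hct
      cases hcon : (PySem.Dict.mk dictionary).contains k
      · rfl
      · exact absurd ((PySem.Dict.contains_iff_mem_keys _ _).mp hcon) hnm
    simp only [Function.comp_apply, hD]
    rw [pvA_getD, PySem.Dict.getD_of_not_contains _ [] hnotin]
    simp
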